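-- pv_equiv track=rewrite | github.com/Kaanta0/Colony | Heaven-and-Earth-main/bot/cogs/combat.py | _loot_colour_for_grade
-- ===== SOURCE A (Python) =====
-- def _loot_colour_for_grade(grade_value: int, kind: str) -> str:
--     if kind == "currency":
--         return "teal"
--     thresholds = [
--         (9, "yellow"),
--         (7, "amber"),
--         (5, "magenta"),
--         (3, "cyan"),
--         (1, "green"),
--     ]
--     for threshold, colour in thresholds:
--         if grade_value >= threshold:
--             return colour
--     return "gray"
-- ===== SOURCE B (Python) =====
-- _PALETTE = ["green", "cyan", "magenta", "amber", "yellow"]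
--
-- def _loot_colour_for_grade(grade_value: int, kind: str) -> str:
--     if kind == "currency":
--         return "teal"
--     if grade_value < 1:
--         return "gray"
--     return _PALETTE[min((grade_value - 1) // 2, 4)]
-- ===== Notes on version B (the rewrite author's own statement) =====
-- stated objective: idiomatic
-- what changed: Replaces the descending threshold scan with a closed-form arithmetic index min((grade_value-1)//2, 4) into a palette list.
import Mathlib
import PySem

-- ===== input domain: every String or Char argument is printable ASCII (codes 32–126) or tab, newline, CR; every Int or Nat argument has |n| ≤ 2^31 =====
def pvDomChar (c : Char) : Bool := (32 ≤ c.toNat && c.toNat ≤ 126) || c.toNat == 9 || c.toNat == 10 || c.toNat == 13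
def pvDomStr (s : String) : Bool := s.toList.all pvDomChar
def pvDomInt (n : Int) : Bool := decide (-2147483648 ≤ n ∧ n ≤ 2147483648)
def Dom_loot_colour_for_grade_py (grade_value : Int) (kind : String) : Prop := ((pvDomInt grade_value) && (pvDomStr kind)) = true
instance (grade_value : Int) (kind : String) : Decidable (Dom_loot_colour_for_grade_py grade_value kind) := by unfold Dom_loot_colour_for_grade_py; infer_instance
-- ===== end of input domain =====

-- B replaces A's descending threshold scan with a closed-form arithmetic index into a palette list (idiomatic, O(1)).

-- ===== PORT A =====
-- the 'for threshold, colour in thresholds' loop, returning "gray" when the list is exhausted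
def lootScan : List (Int × String) → Int → String
  | [], _ => "gray"
  | (t, c) :: rest, g => if g ≥ t then c else lootScan rest g

def loot_colour_for_grade_py (grade_value : Int) (kind : String) : String :=
  if kind = "currency" then "teal"
  else
    lootScan [(9, "yellow"), (7, "amber"), (5, "magenta"), (3, "cyan"), (1, "green")] grade_value

-- ===== PORT B =====
def loot_colour_for_grade_py_alt (grade_value : Int) (kind : String) : String :=
  if kind = "currency" then "teal"
  else if grade_value < 1 then "gray"
  else
    -- index is always in 0..4, so the default of pyGet? is unreachable
    (PySem.List.pyGet? ["green", "cyan", "magenta", "amber", "yellow"]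
      (min (PySem.Int.floordiv (grade_value - 1) 2) 4)).getD ""

-- ===== PRECONDITION & SPEC =====
def Spec_loot_colour_for_grade_py (grade_value : Int) (kind : String) (out : String) : Prop := out = loot_colour_for_grade_py_alt grade_value kind
instance (grade_value : Int) (kind : String) (out : String) : Decidable (Spec_loot_colour_for_grade_py grade_value kind out) := by unfold Spec_loot_colour_for_grade_py; infer_instance

-- ===== CLAIM (what is proved, stated in full; the proofs are below) =====
def Claim_equal_loot_colour_for_grade_py : Prop := ∀ (grade_value : Int) (kind : String), Dom_loot_colour_for_grade_py grade_value kind → Spec_loot_colour_for_grade_py grade_value kind (loot_colour_for_grade_py grade_value kind)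

-- ===== LEMMAS AND PROOFS =====

-- ===== VERDICT (by name: the statement is the Claim_ definition above) =====
theorem loot_colour_for_grade_py_spec : Claim_equal_loot_colour_for_grade_py := by
  intro g k _
  unfold Spec_loot_colour_for_grade_py loot_colour_for_grade_py loot_colour_for_grade_py_alt
  by_cases hk : k = "currency" <;> simp [hk, lootScan]
  rcases lt_or_ge g 1 with h | h
  · simp [show ¬ g ≥ 9 by omega, show ¬ g ≥ 7 by omega, show ¬ g ≥ 5 by omega,
      show ¬ g ≥ 3 by omega, show ¬ g ≥ 1 by omega, h]
  · have hnd : ¬ g < 1 := by omega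
    rcases le_or_gt 9 g with h9 | h9
    · have : min ((g - 1) / 2) 4 = 4 := by omega
      simp [show g ≥ 9 by omega, hnd, this, PySem.List.pyGet?, PySem.List.pyIdx?]
    · rcases le_or_gt 7 g with h7 | h7
      · have : min ((g - 1) / 2) 4 = 3 := by omega
        simp [show ¬ g ≥ 9 by omega, show g ≥ 7 by omega, hnd, this, PySem.List.pyGet?, PySem.List.pyIdx?]
      · rcases le_or_gt 5 g with h5 | h5
        · have : min ((g - 1) / 2) 4 = 2 := by omega
          simp [show ¬ g ≥ 9 by omega, show ¬ g ≥ 7 by omega, show g ≥ 5 by omega, hnd, this,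
            PySem.List.pyGet?, PySem.List.pyIdx?]
        · rcases le_or_gt 3 g with h3 | h3
          · have : min ((g - 1) / 2) 4 = 1 := by omega
            simp [show ¬ g ≥ 9 by omega, show ¬ g ≥ 7 by omega, show ¬ g ≥ 5 by omega,
              show g ≥ 3 by omega, hnd, this, PySem.List.pyGet?, PySem.List.pyIdx?]
          · have : min ((g - 1) / 2) 4 = 0 := by omega
            simp [show ¬ g ≥ 9 by omega, show ¬ g ≥ 7 by omega, show ¬ g ≥ 5 by omega,
              show ¬ g ≥ 3 by omega, show g ≥ 1 by omega, hnd, this, PySem.List.pyGet?, PySem.List.pyIdx?]
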